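-- pv_equiv track=rewrite | github.com/giuper/teaching | OldClasses/ALGO20/Exams/210128/Fibonacci-02/gFibo.py | maxK
-- ===== SOURCE A (Python) =====
-- def fibIter(n,k):
--     if n<=k:
--         return 1
--     A=[1]*k
--     sumP=k
--     for i in range(k+1,n+1):
--         A.append(sumP)
--         x=A.pop(0)
--         sumP=2*sumP-x
--     return A[k-1]
--
-- def maxK(n):
--     mx=0
--     for k in range(2,n):
--         r=fibIter(n,k)
--         if r>mx:
--             mx=r
--             kk=k
--     return kk
-- ===== SOURCE B (Python) =====
-- def fibo(n, k):
--     if n <= k: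
--         return 1
--     seq = [1] * k
--     s = k
--     for i in range(n - k):
--         seq.append(s)
--         s += s - seq[i]
--     return seq[-1]
--
-- def maxK(n):
--     return max(range(2, n), key=lambda k: fibo(n, k))
-- ===== Notes on version B (the rewrite author's own statement) =====
-- stated objective: simpler
-- what changed: fibIter's sliding-window deque (append/pop(0) with running sum 2*sumP-x) is replaced by a growing sequence indexed directly (s += s - seq[i-k], returning seq[n-1]), and maxK's manual first-wins running-max loop is replaced by the builtin max(range(2,n), key=fibo).
-- outside the precondition, e.g. on maxK(2): A raises UnboundLocalError, B raises ValueError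
import Mathlib
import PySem

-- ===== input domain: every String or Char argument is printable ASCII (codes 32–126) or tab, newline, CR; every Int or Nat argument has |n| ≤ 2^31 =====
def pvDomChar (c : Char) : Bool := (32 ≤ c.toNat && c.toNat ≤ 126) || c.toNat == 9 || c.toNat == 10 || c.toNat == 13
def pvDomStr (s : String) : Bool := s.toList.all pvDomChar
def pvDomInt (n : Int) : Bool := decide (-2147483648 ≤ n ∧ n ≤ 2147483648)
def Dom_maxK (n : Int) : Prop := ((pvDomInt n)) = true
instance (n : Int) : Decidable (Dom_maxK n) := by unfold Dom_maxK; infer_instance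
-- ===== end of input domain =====

-- B replaces A's sliding-window deque (append/pop(0) + running sum 2*sumP-x) by a growing
-- sequence indexed directly (s += s - seq[i-k]) and replaces maxK's manual first-wins
-- tracking by max(range(2,n), key=...); objective: simpler.

-- ===== PORT A =====
-- body of A's 'for i in range(k+1, n+1)' loop: A.append(sumP); x = A.pop(0); sumP = 2*sumP - x
def fibIterStep (st : List Int × Int) (_i : Int) : List Int × Int :=
  let A1 := st.1 ++ [st.2]
  match PySem.List.pop? A1 0 with
  | some (x, A2) => (A2, 2 * st.2 - x)
  | none => (A1, st.2)  -- pop(0) on []: IndexError; unreachable here since A1 ends with st.2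

def fibIter (n k : Int) : Int :=
  if n ≤ k then 1
  else
    let st := (PySem.List.pyRange (k + 1) (n + 1) 1).foldl fibIterStep
      (List.replicate k.toNat 1, k)
    PySem.List.pyGetD st.1 (k - 1) 0  -- A[k-1]; in range for every call maxK makes (2 ≤ k)

def maxK (n : Int) : Int :=
  let st := (PySem.List.pyRange 2 n 1).foldl
    (fun (st : Int × Option Int) k =>
      let r := fibIter n k
      if r > st.1 then (r, some k) else st)
    (0, (none : Option Int))
  st.2.getD 0  -- kk; none = unbound kk (NameError), excluded by Pre_maxK

-- ===== PORT B =====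
-- body of B's 'for i in range(n - k)' loop: seq.append(s); s += s - seq[i]
def fiboStep (st : List Int × Int) (i : Int) : List Int × Int :=
  let seq := st.1 ++ [st.2]
  (seq, st.2 + (st.2 - PySem.List.pyGetD seq i 0))

def fibo (n k : Int) : Int :=
  if n ≤ k then 1
  else
    let st := (PySem.List.pyRange 0 (n - k) 1).foldl fiboStep
      (List.replicate k.toNat 1, k)
    PySem.List.pyGetD st.1 (-1) 0  -- seq[-1]; seq is non-empty for every call maxK makes

def maxK_alt (n : Int) : Int :=
  match PySem.List.max? (PySem.List.pyRange 2 n 1) (fun k => fibo n k) with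
  | some k => k
  | none => 0  -- max() of an empty range raises ValueError, excluded by Pre_maxK

-- ===== PRECONDITION & SPEC =====
-- Pre_ excludes n ≤ 2: there range(2,n) is empty, A raises NameError (kk unbound) and B's max() raises ValueError.
def Pre_maxK (n : Int) : Prop := 3 ≤ n
instance (n : Int) : Decidable (Pre_maxK n) := by unfold Pre_maxK; infer_instance
def pvWitness_maxK : Int := 5

def Spec_maxK (n : Int) (out : Int) : Prop := out = maxK_alt n
instance (n : Int) (out : Int) : Decidable (Spec_maxK n out) := by unfold Spec_maxK; infer_instance

-- ===== CLAIM (what is proved, stated in full; the proofs are below) =====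
def Claim_equal_maxK : Prop := ∀ (n : Int), Dom_maxK n → Pre_maxK n → Spec_maxK n (maxK n)

-- ===== LEMMAS AND PROOFS =====

/-- Joint invariant of the two inner loops after `m` steps: B's state is the full sequence
`seq` (all entries ≥ 1) with `s` the sum of its last `k` entries, and A's deque is exactly
those last `k` entries with the same running sum. -/
lemma loop_inv (k : Int) (hk : 1 ≤ k) (m : Nat) :
    ∃ seq s,
      (PySem.List.pyRange 0 (m : Int) 1).foldl fiboStep
          (List.replicate k.toNat 1, k) = (seq, s) ∧
      (PySem.List.pyRange (k + 1) (k + 1 + (m : Int)) 1).foldl fibIterStep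
          (List.replicate k.toNat 1, k) = (seq.drop m, s) ∧
      seq.length = k.toNat + m ∧ (∀ x ∈ seq, 1 ≤ x) ∧ s = (seq.drop m).sum := by
  induction m with
  | zero =>
      refine ⟨List.replicate k.toNat 1, k, ?_, ?_, ?_, ?_, ?_⟩
      · simp [PySem.List.pyRange_one_eq_nil (le_refl (0:Int))]
      · simp [PySem.List.pyRange_one_eq_nil (le_refl (k + 1))]
      · simp
      · intro x hx; simp [List.eq_of_mem_replicate hx]
      · simp [List.sum_replicate]
        omega
  | succ m ih =>
      obtain ⟨seq, s, hB, hA, hlen, hpos, hsum⟩ := ih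
      have hm : m < seq.length := by omega
      have hm1 : m + 1 ≤ seq.length := by omega
      have hdropm : seq.drop m = seq[m] :: seq.drop (m + 1) :=
        List.drop_eq_getElem_cons hm
      have hBrange : PySem.List.pyRange 0 ((m + 1 : Nat) : Int) 1
          = PySem.List.pyRange 0 (m : Int) 1 ++ [(m : Int)] := by
        have := PySem.List.pyRange_one_succ_right (a := 0) (b := (m : Int)) (by omega)
        push_cast
        exact this
      have hArange : PySem.List.pyRange (k + 1) (k + 1 + ((m + 1 : Nat) : Int)) 1
          = PySem.List.pyRange (k + 1) (k + 1 + (m : Int)) 1 ++ [k + 1 + (m : Int)] := by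
        have := PySem.List.pyRange_one_succ_right (a := k + 1) (b := k + 1 + (m : Int)) (by omega)
        push_cast
        rw [show k + 1 + ((m : Int) + 1) = k + 1 + (m : Int) + 1 by ring]
        exact this
      -- the new B state
      have hgetm : (seq ++ [s])[(m : Nat)]?.getD 0 = seq[m] := by
        rw [List.getElem?_append_left hm, List.getElem?_eq_getElem hm]
        rfl
      have hstepB : fiboStep (seq, s) ((m : Nat) : Int)
          = (seq ++ [s], s + (s - seq[m])) := by
        simp only [fiboStep]
        rw [PySem.List.pyGetD_natCast, List.getD_eq_getElem?_getD, hgetm]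
      have hstepA : fibIterStep (seq.drop m, s) (k + 1 + (m : Int))
          = (seq.drop (m + 1) ++ [s], 2 * s - seq[m]) := by
        simp only [fibIterStep, hdropm, List.cons_append, PySem.List.pop?_zero_cons]
      have hdrop : (seq ++ [s]).drop (m + 1) = seq.drop (m + 1) ++ [s] :=
        List.drop_append_of_le_length hm1
      have hs1 : 1 ≤ seq[m] := hpos _ (List.getElem_mem hm)
      have hsum' : (seq.drop (m + 1)).sum = s - seq[m] := by
        rw [hdropm, List.sum_cons] at hsum; omega
      refine ⟨seq ++ [s], s + (s - seq[m]), ?_, ?_, ?_, ?_, ?_⟩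
      · rw [hBrange, List.foldl_append, hB]; simp [hstepB]
      · rw [hArange, List.foldl_append, hA]
        simp only [List.foldl_cons, List.foldl_nil, hstepA, hdrop]
        refine Prod.ext rfl ?_
        simp; omega
      · simp [hlen]; omega
      · intro x hx
        rcases List.mem_append.mp hx with h | h
        · exact hpos _ h
        · -- the appended entry is s, the sum of a non-empty list of entries ≥ 1
          have hx' : x = s := by simpa using h
          have h0 : 0 ≤ (seq.drop (m + 1)).sum :=
            List.sum_nonneg (fun y hy => le_trans (by norm_num)
              (hpos _ (List.mem_of_mem_drop hy)))
          omega
      · rw [hdrop]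
        simp [hsum']
        omega

/-- The two k-bonacci helpers agree for every k ≥ 1. -/
lemma fib_eq (n k : Int) (hk : 1 ≤ k) : fibIter n k = fibo n k := by
  by_cases hnk : n ≤ k
  · simp [fibIter, fibo, hnk]
  · have hkt : 1 ≤ k.toNat := by omega
    set m : Nat := (n - k).toNat with hm
    have hn : n = k + (m : Int) := by omega
    have hn1 : n + 1 = k + 1 + (m : Int) := by omega
    obtain ⟨seq, s, hB, hA, hlen, hpos, hsum⟩ := loop_inv k hk m
    have hmlen : m ≤ seq.length := by omega
    have hne : seq ≠ [] := by
      intro h; rw [h] at hlen; simp at hlen; omega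
    simp only [fibIter, fibo, if_neg hnk]
    rw [hn, show k + (m : Int) + 1 = k + 1 + (m : Int) by ring,
      show k + (m : Int) - k = ((m : Nat) : Int) by ring, hB, hA]
    dsimp only
    rw [PySem.List.pyGetD_neg_one seq 0 hne, List.getLast_eq_getElem,
      PySem.List.pyGetD_eq_getElem]
    · rw [List.getElem_drop]
      congr 1
      omega
    all_goals ((try simp only [List.length_drop]); omega)

/-- B's k-bonacci value is at least 1 (for k ≥ 1). -/
lemma fibo_pos (n k : Int) (hk : 1 ≤ k) : 1 ≤ fibo n k := by
  by_cases hnk : n ≤ k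
  · simp [fibo, hnk]
  · set m : Nat := (n - k).toNat with hm
    have hn : n = k + (m : Int) := by omega
    obtain ⟨seq, s, hB, _hA, hlen, hpos, _hsum⟩ := loop_inv k hk m
    have hne : seq ≠ [] := by
      intro h; rw [h] at hlen; simp at hlen; omega
    simp only [fibo, if_neg hnk]
    rw [hn, show k + (m : Int) - k = ((m : Nat) : Int) by ring, hB]
    dsimp only
    rw [PySem.List.pyGetD_neg_one seq 0 hne, List.getLast_eq_getElem]
    exact hpos _ (List.getElem_mem (by omega))

/-- A's first-wins strict-`>` running-max loop computes `max?`'s first extremal element,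
once started from an already-selected element. -/
lemma first_max (key : Int → Int) : ∀ (l : List Int) (c : Int),
    ∃ c', PySem.List.max? (c :: l) key = some c'
      ∧ l.foldl (fun st y => if key y > st.1 then (key y, some y) else st)
            (key c, some c) = (key c', some c') := by
  intro l
  induction l with
  | nil => exact fun c => ⟨c, rfl, rfl⟩
  | cons x t ih =>
      intro c
      by_cases h : key c < key x
      · obtain ⟨c', h1, h2⟩ := ih x
        refine ⟨c', ?_, by simpa [h, gt_iff_lt] using h2⟩
        simpa [PySem.List.max?, h] using h1
      · obtain ⟨c', h1, h2⟩ := ih c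
        refine ⟨c', ?_, by simpa [h, gt_iff_lt] using h2⟩
        simpa [PySem.List.max?, h] using h1

-- ===== VERDICT (by name: the statement is the Claim_ definition above) =====
theorem maxK_spec : Claim_equal_maxK := by
  intro n _hdom hpre
  unfold Spec_maxK maxK maxK_alt
  have hn : (2:Int) < n := by unfold Pre_maxK at hpre; omega
  have hcons : PySem.List.pyRange 2 n 1 = 2 :: PySem.List.pyRange 3 n 1 := by
    have := PySem.List.pyRange_one_cons (a := 2) (b := n) hn
    norm_num at this
    exact this
  -- replace fibIter by fibo inside A's loop (every k in the range has 1 ≤ k)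
  have hcong : (PySem.List.pyRange 2 n 1).foldl
      (fun (st : Int × Option Int) k =>
        let r := fibIter n k
        if r > st.1 then (r, some k) else st) (0, (none : Option Int))
      = (PySem.List.pyRange 2 n 1).foldl
        (fun (st : Int × Option Int) k =>
          if fibo n k > st.1 then (fibo n k, some k) else st)
        (0, (none : Option Int)) := by
    refine PySem.List.foldl_congr_mem _ _ _ _ (fun acc x hx => ?_)
    have hx' : (2:Int) ≤ x := ((PySem.List.mem_pyRange_one).mp hx).1
    simp only [fib_eq n x (by omega)]
  rw [hcong, hcons]
  have h2 : fibo n 2 > (0:Int) := lt_of_lt_of_le (by norm_num) (fibo_pos n 2 (by norm_num))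
  obtain ⟨c', h1, h2'⟩ := first_max (fun k => fibo n k) (PySem.List.pyRange 3 n 1) 2
  rw [h1]
  simp only [List.foldl_cons]
  rw [if_pos h2, h2']
  rfl
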